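-- pv_equiv track=rewrite | github.com/aCLImatise/CliHelpParser | aclimatise/name_generation.py | duplicate_keys
-- ===== SOURCE A (Python) =====
-- from itertools import groupby
-- from typing import Generator, Iterable, List, Optional, Set, Tuple
--
-- def duplicate_keys(l: list) -> Set[int]:
--     """
--     Identifies the indexes of duplicates in a given list
--     """
--     ret = set()
--     for entry, indices in groupby(
--         sorted(enumerate(l), key=lambda x: x[1]), key=lambda x: x[1]
--     ):
--         indices = list(indices)
--         if len(indices) > 1 and len("".join(entry)) > 0:
--             # The keys we still need to iterate on are those with duplicate commands, but if the names are empty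
--             # strings, we should stop iterating and try another method
--             for index in indices:
--                 ret.add(index[0])
--     return ret
-- ===== SOURCE B (Python) =====
-- def duplicate_keys(l: list):
--     """
--     Identifies the indexes of duplicates in a given list
--     """
--     # One pass: group indices by entry in a dict, then walk the (few) distinct
--     # keys in sorted order -- no sort of the whole index/entry pair list, no groupby.
--     groups = {}
--     for i, entry in enumerate(l):
--         groups.setdefault(entry, []).append(i)
--     ret = set()
--     for entry in sorted(groups):
--         indices = groups[entry]
--         if len(indices) > 1 and entry:
--             ret.update(indices)
--     return ret
-- ===== Notes on version B (the rewrite author's own statement) =====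
-- stated objective: alternative
-- what changed: replaces sort-of-all-(index,entry)-pairs + itertools.groupby with a single dict pass grouping indices by entry, then a sort over only the distinct keys
import Mathlib
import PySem

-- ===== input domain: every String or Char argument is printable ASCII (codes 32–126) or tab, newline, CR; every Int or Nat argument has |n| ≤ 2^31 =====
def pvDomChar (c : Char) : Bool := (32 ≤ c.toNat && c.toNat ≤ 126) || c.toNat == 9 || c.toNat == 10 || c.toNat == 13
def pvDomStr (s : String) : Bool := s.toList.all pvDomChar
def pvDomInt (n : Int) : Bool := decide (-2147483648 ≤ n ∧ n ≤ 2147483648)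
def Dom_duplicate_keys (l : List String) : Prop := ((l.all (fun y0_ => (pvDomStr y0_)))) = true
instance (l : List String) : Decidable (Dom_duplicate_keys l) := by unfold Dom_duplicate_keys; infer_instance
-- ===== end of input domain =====

-- B replaces sort-all-pairs + groupby by one dict-grouping pass plus a sort of the distinct keys only.
-- Both Pythons return a set (unordered); the ports return its element list in construction order, which the proof shows coincides.

-- ===== PORT A =====
-- itertools.groupby(s, key=lambda x: x[1]) : maximal runs of consecutive pairs with equal second component
def pyGroupby : List (Int × String) → List (String × List (Int × String))
  | [] => []
  | p :: rest =>
      (p.2, p :: rest.takeWhile (fun q => q.2 == p.2)) ::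
        pyGroupby (rest.dropWhile (fun q => q.2 == p.2))
  termination_by l => l.length
  decreasing_by
    simpa using Nat.lt_succ_of_le (List.length_dropWhile_le (fun q => q.2 == p.2) rest)

def duplicate_keys (l : List String) : List Int :=
  let s := PySem.List.sorted (PySem.List.enumerate l) (fun x => x.2) false
  (pyGroupby s).foldl
    (fun ret g =>
      -- ''.join(entry) over a str's characters is that str itself (exact), so its len is Str.len g.1
      if 1 < g.2.length ∧ 0 < PySem.Str.len g.1 then
        g.2.foldl (fun r index => PySem.Set.add r index.1) ret
      else ret)
    PySem.Set.empty

-- ===== PORT B =====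
def duplicate_keys_alt (l : List String) : List Int :=
  let groups := (PySem.List.enumerate l).foldl
    (fun d p => d.modify p.2 [] (fun xs => xs ++ [p.1])) PySem.Dict.empty
  let ks := PySem.List.sorted groups.keys (fun x => x) false
  ks.foldl
    (fun ret k =>
      let indices := groups.getD k []
      if 1 < indices.length ∧ k ≠ "" then PySem.Set.update ret indices else ret)
    PySem.Set.empty

-- ===== PRECONDITION & SPEC =====
def Spec_duplicate_keys (l : List String) (out : List Int) : Prop := out = duplicate_keys_alt l
instance (l : List String) (out : List Int) : Decidable (Spec_duplicate_keys l out) := by unfold Spec_duplicate_keys; infer_instance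

-- ===== CLAIM (what is proved, stated in full; the proofs are below) =====
def Claim_equal_duplicate_keys : Prop := ∀ (l : List String), Dom_duplicate_keys l → Spec_duplicate_keys l (duplicate_keys l)

-- ===== LEMMAS AND PROOFS =====

-- ordered insert of a fresh key into a strictly increasing key list
def insOrd (x : String) : List String → List String
  | [] => [x]
  | k :: t => if x < k then x :: k :: t else k :: insOrd x t

-- the canonical grouped form: keys in order, each key's block of pairs
def canon (ks : List String) (ps : List (Int × String)) : List (Int × String) :=
  ks.flatMap (fun k => ps.filter (fun p => p.2 == k))

lemma mem_insOrd (x y : String) (ks : List String) :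
    y ∈ insOrd x ks ↔ y = x ∨ y ∈ ks := by
  induction ks with
  | nil => simp [insOrd]
  | cons k t ih =>
      simp only [insOrd]
      split_ifs <;> simp [ih] <;> tauto

lemma pairwise_insOrd (x : String) (ks : List String) (hx : x ∉ ks)
    (h : ks.Pairwise (· < ·)) : (insOrd x ks).Pairwise (· < ·) := by
  induction ks with
  | nil => simp [insOrd]
  | cons k t ih =>
      simp only [insOrd]
      rcases List.pairwise_cons.mp h with ⟨hk, ht⟩
      split_ifs with hlt
      · exact List.pairwise_cons.mpr ⟨by
          intro y hy
          rcases List.mem_cons.mp hy with rfl | hy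
          · exact hlt
          · exact lt_trans hlt (hk y hy), h⟩
      · refine List.pairwise_cons.mpr ⟨?_, ih (by simp_all) ht⟩
        intro y hy
        rcases (mem_insOrd x y t).mp hy with rfl | hy
        · exact lt_of_le_of_ne (le_of_not_gt hlt) (by rintro rfl; simp at hx)
        · exact hk y hy

lemma perm_insOrd (x : String) (ks : List String) :
    (insOrd x ks).Perm (ks ++ [x]) := by
  induction ks with
  | nil => simp [insOrd]
  | cons k t ih =>
      simp only [insOrd]
      split_ifs
      · exact List.Perm.symm (List.perm_append_comm.trans (by simp))
      · exact (List.Perm.cons k ih)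

-- insertBy walks past elements it is not "before"
lemma insertBy_append_not_before (before : Int × String → Int × String → Bool)
    (p : Int × String) (as t : List (Int × String))
    (h : ∀ a ∈ as, before p a = false) :
    PySem.List.insertBy before p (as ++ t) = as ++ PySem.List.insertBy before p t := by
  induction as with
  | nil => simp
  | cons a as ih =>
      simp only [List.cons_append, PySem.List.insertBy, h a (by simp)]
      simp only [Bool.false_eq_true, if_false, List.cons.injEq, true_and]
      exact ih (fun a ha => h a (by simp [ha]))

lemma insertBy_cons_before (before : Int × String → Int × String → Bool)
    (p a : Int × String) (t : List (Int × String)) (h : before p a = true) :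
    PySem.List.insertBy before p (a :: t) = p :: a :: t := by
  simp [PySem.List.insertBy, h]

-- every element of canon ks ps has its key in ks and equal to its block's key
lemma sorted_set_step (m : List String) (x : String) :
    PySem.List.sorted (PySem.Set.ofList (m ++ [x])) (fun k => k) false =
      if x ∈ m then PySem.List.sorted (PySem.Set.ofList m) (fun k => k) false
      else insOrd x (PySem.List.sorted (PySem.Set.ofList m) (fun k => k) false) := by
  rw [PySem.Set.ofList_append]
  by_cases hx : x ∈ m
  · have hc : (PySem.Set.ofList m).contains x = true :=
      (PySem.Set.contains_iff _ _).mpr ((PySem.Set.mem_ofList m x).mpr hx)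
    have : (PySem.Set.ofList m).update [x] = PySem.Set.ofList m := by
      simp [PySem.Set.update, PySem.Set.add, hx]
    rw [this, if_pos hx]
  · have hnot : x ∉ PySem.Set.ofList m := fun h => hx ((PySem.Set.mem_ofList m x).mp h)
    have hc : (PySem.Set.ofList m).contains x = false := by
      by_contra h
      exact hnot ((PySem.Set.contains_iff _ _).mp (by simpa using h))
    have hupd : (PySem.Set.ofList m).update [x] = PySem.Set.ofList m ++ [x] := by
      simp [PySem.Set.update, PySem.Set.add, hx]
    rw [hupd, if_neg hx]
    apply PySem.List.sorted_eq_of_perm_of_pairwise_lt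
    · exact (perm_insOrd x _).trans
        (List.Perm.append_right [x] (PySem.List.sorted_perm _ _ _))
    · refine pairwise_insOrd x _ ?_ ?_
      · intro h
        exact hnot ((PySem.List.mem_sorted _ _ _ _).mp h)
      · exact PySem.List.sorted_ofList_pairwise_lt m

lemma flatMap_congr' {f g : String → List (Int × String)} (t : List String)
    (h : ∀ k ∈ t, f k = g k) : t.flatMap f = t.flatMap g := by
  induction t with
  | nil => rfl
  | cons k t ih =>
      simp only [List.flatMap_cons, h k (by simp), ih (fun k hk => h k (by simp [hk]))]

-- how insertBy lands inside the canonical grouped form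
lemma insertBy_canon (ks : List String) (g : String → List (Int × String)) (p : Int × String)
    (hg : ∀ k ∈ ks, g k ≠ []) (hkey : ∀ k ∈ ks, ∀ q ∈ g k, q.2 = k)
    (hp : ks.Pairwise (· < ·)) :
    PySem.List.insertBy (fun a b => decide (a.2 < b.2)) p (ks.flatMap g) =
      if p.2 ∈ ks then ks.flatMap (fun k => g k ++ if k = p.2 then [p] else [])
      else (insOrd p.2 ks).flatMap (fun k => if k = p.2 then [p] else g k) := by
  induction ks with
  | nil => simp [PySem.List.insertBy, insOrd]
  | cons k t ih =>
      rcases List.pairwise_cons.mp hp with ⟨hkt, hpt⟩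
      have hgk := hg k (by simp)
      have hkeyk := hkey k (by simp)
      rcases hq : g k with _ | ⟨q, qs⟩
      · exact absurd hq hgk
      have hq2 : q.2 = k := hkeyk q (by rw [hq]; simp)
      rcases lt_trichotomy p.2 k with hlt | heq | hgt
      · -- p goes in front of the whole flatMap
        have hnm : p.2 ∉ k :: t := by
          intro hm
          rcases List.mem_cons.mp hm with rfl | hm
          · exact lt_irrefl _ hlt
          · exact lt_asymm hlt (hkt _ hm)
        rw [if_neg hnm]
        have : insOrd p.2 (k :: t) = p.2 :: k :: t := by simp [insOrd, hlt]
        rw [this]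
        have hfirst : PySem.List.insertBy (fun a b => decide (a.2 < b.2)) p ((k :: t).flatMap g)
            = p :: (k :: t).flatMap g := by
          rw [List.flatMap_cons, hq]
          exact insertBy_cons_before _ _ _ _ (by simp [hq2, hlt])
        have hts : t.flatMap (fun k' => if k' = p.2 then [p] else g k') = t.flatMap g := by
          apply flatMap_congr'
          intro k' hk'
          rw [if_neg]
          intro h
          exact lt_asymm hlt (h ▸ hkt _ hk')
        rw [hfirst]
        simp only [List.flatMap_cons, if_neg (ne_of_gt hlt), hts]
        simp
      · -- p appends to its own group g k
        rw [if_pos (by simp [heq])]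
        have hwalk : PySem.List.insertBy (fun a b => decide (a.2 < b.2)) p ((k :: t).flatMap g)
            = g k ++ PySem.List.insertBy (fun a b => decide (a.2 < b.2)) p (t.flatMap g) := by
          rw [List.flatMap_cons]
          apply insertBy_append_not_before
          intro a ha
          have := hkeyk a ha
          simp [this, heq]
        rw [hwalk]
        have hrest : PySem.List.insertBy (fun a b => decide (a.2 < b.2)) p (t.flatMap g)
            = p :: t.flatMap g ∨ (t = [] ∧ PySem.List.insertBy (fun a b => decide (a.2 < b.2)) p (t.flatMap g) = [p]) := by
          rcases ht : t with _ | ⟨k', t'⟩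
          · right; exact ⟨rfl, by simp [PySem.List.insertBy]⟩
          · left
            have hgk' := hg k' (by simp [ht])
            rcases hq' : g k' with _ | ⟨q', qs'⟩
            · exact absurd hq' hgk'
            have hq'2 : q'.2 = k' := hkey k' (by simp [ht]) q' (by rw [hq']; simp)
            rw [List.flatMap_cons, hq']
            exact insertBy_cons_before _ _ _ _
              (by simp [hq'2, heq ▸ hkt k' (by simp [ht])])
        have hts : t.flatMap (fun k' => g k' ++ if k' = p.2 then [p] else []) = t.flatMap g := by
          apply flatMap_congr'
          intro k' hk'
          rw [if_neg, List.append_nil]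
          intro h
          exact absurd (heq ▸ h ▸ hkt k' hk') (lt_irrefl _)
        rcases hrest with hrest | ⟨rfl, hrest⟩
        · rw [hrest, List.flatMap_cons, if_pos heq.symm, hts]
          simp
        · rw [hrest, List.flatMap_cons, if_pos heq.symm]
          simp
      · -- p belongs strictly after group k : recurse
        have hne : p.2 ≠ k := ne_of_gt hgt
        have hwalk : PySem.List.insertBy (fun a b => decide (a.2 < b.2)) p ((k :: t).flatMap g)
            = g k ++ PySem.List.insertBy (fun a b => decide (a.2 < b.2)) p (t.flatMap g) := by
          rw [List.flatMap_cons]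
          apply insertBy_append_not_before
          intro a ha
          have ha2 := hkeyk a ha
          simp only [ha2, decide_eq_false_iff_not]
          exact not_lt_of_gt hgt
        rw [hwalk, ih (fun k' hk' => hg k' (by simp [hk']))
          (fun k' hk' => hkey k' (by simp [hk'])) hpt]
        by_cases hmem : p.2 ∈ t
        · rw [if_pos hmem, if_pos (by simp [hmem]), List.flatMap_cons,
            if_neg (fun h : k = p.2 => hne h.symm), List.append_nil]
        · have hnm : p.2 ∉ k :: t := fun h => by
            rcases List.mem_cons.mp h with h | h
            · exact hne h
            · exact hmem h
          rw [if_neg hmem, if_neg hnm]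
          have : insOrd p.2 (k :: t) = k :: insOrd p.2 t := by
            simp only [insOrd]
            rw [if_neg (not_lt_of_gt hgt)]
          rw [this, List.flatMap_cons, if_neg (fun h : k = p.2 => hne h.symm)]

-- STABILITY: Python's stable sort by key equals the canonical grouped form
lemma stable_sorted (ps : List (Int × String)) :
    PySem.List.sorted ps (fun p => p.2) false =
      canon (PySem.List.sorted (PySem.Set.ofList (ps.map (fun p => p.2))) (fun k => k) false) ps := by
  induction ps using List.reverseRecOn with
  | nil => rfl
  | append_singleton ps p ih =>
      rw [PySem.List.sorted_eq_foldl_insertBy, List.foldl_append, List.foldl_cons, List.foldl_nil,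
        ← PySem.List.sorted_eq_foldl_insertBy, ih]
      have hmemK : ∀ y, y ∈ PySem.List.sorted (PySem.Set.ofList (ps.map (fun p => p.2))) (fun k => k) false
          ↔ y ∈ ps.map (fun p => p.2) := by
        intro y; rw [PySem.List.mem_sorted, PySem.Set.mem_ofList]
      unfold canon
      have hg : ∀ k ∈ PySem.List.sorted (PySem.Set.ofList (ps.map (fun p => p.2))) (fun k => k) false,
          ps.filter (fun p => p.2 == k) ≠ [] := by
        intro k hk
        rcases List.mem_map.mp ((hmemK k).mp hk) with ⟨q, hq, rfl⟩
        intro hnil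
        exact absurd (by simp : (q.2 == q.2) = true)
          (by simpa using List.filter_eq_nil_iff.mp hnil q hq)
      have hkey : ∀ k ∈ PySem.List.sorted (PySem.Set.ofList (ps.map (fun p => p.2))) (fun k => k) false,
          ∀ q ∈ ps.filter (fun p => p.2 == k), q.2 = k := by
        intro k _ q hq
        simpa using (List.mem_filter.mp hq).2
      rw [insertBy_canon _ _ p hg hkey (PySem.List.sorted_ofList_pairwise_lt _)]
      have hmap : (ps ++ [p]).map (fun p => p.2) = ps.map (fun p => p.2) ++ [p.2] := by simp
      rw [hmap, sorted_set_step]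
      by_cases hmem : p.2 ∈ ps.map (fun p => p.2)
      · rw [if_pos ((hmemK p.2).mpr hmem), if_pos hmem]
        apply flatMap_congr'
        intro k _
        by_cases h : k = p.2 <;>
          simp [h, List.filter_append, beq_iff_eq, Ne.symm]
      · rw [if_neg (fun h => hmem ((hmemK p.2).mp h)), if_neg hmem]
        apply flatMap_congr'
        intro k _
        by_cases h : k = p.2
        · have hnil : ps.filter (fun q => q.2 == p.2) = [] := by
            rw [List.filter_eq_nil_iff]
            intro a ha hbeq
            exact hmem (List.mem_map.mpr ⟨a, ha, (by simpa using hbeq)⟩)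
          simp [h, List.filter_append, hnil]
        · have hb : (p.2 == k) = false := by
            simp only [beq_eq_false_iff_ne, ne_eq]
            exact fun hpk => h hpk.symm
          simp [h, List.filter_append, hb]

lemma takeWhile_all_append (pred : Int × String → Bool) (as t : List (Int × String))
    (h : ∀ a ∈ as, pred a = true) :
    (as ++ t).takeWhile pred = as ++ t.takeWhile pred := by
  induction as with
  | nil => rfl
  | cons a as ih =>
      simp only [List.cons_append, List.takeWhile_cons, h a (by simp)]
      simp [ih (fun a ha => h a (by simp [ha]))]

lemma dropWhile_all_append (pred : Int × String → Bool) (as t : List (Int × String))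
    (h : ∀ a ∈ as, pred a = true) :
    (as ++ t).dropWhile pred = t.dropWhile pred := by
  induction as with
  | nil => rfl
  | cons a as ih =>
      simp only [List.cons_append, List.dropWhile_cons, h a (by simp)]
      simp [ih (fun a ha => h a (by simp [ha]))]

-- groupby of the canonical form is one group per key
lemma takeWhile_false_all (pred : Int × String → Bool) (u : List (Int × String))
    (h : ∀ a ∈ u, pred a = false) : u.takeWhile pred = [] := by
  cases u with
  | nil => rfl
  | cons a u => simp [h a (by simp)]

lemma dropWhile_false_all (pred : Int × String → Bool) (u : List (Int × String))
    (h : ∀ a ∈ u, pred a = false) : u.dropWhile pred = u := by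
  cases u with
  | nil => rfl
  | cons a u => simp [h a (by simp)]

lemma pyGroupby_canon (ks : List String) (ps : List (Int × String))
    (hne : ∀ k ∈ ks, (ps.filter (fun p => p.2 == k)) ≠ [])
    (hp : ks.Pairwise (· < ·)) :
    pyGroupby (canon ks ps) = ks.map (fun k => (k, ps.filter (fun p => p.2 == k))) := by
  induction ks with
  | nil => simp [canon, pyGroupby]
  | cons k t ih =>
      rcases List.pairwise_cons.mp hp with ⟨hkt, hpt⟩
      rcases hq : ps.filter (fun p => p.2 == k) with _ | ⟨q, qs⟩
      · exact absurd hq (hne k (by simp))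
      have hallk : ∀ a ∈ ps.filter (fun p => p.2 == k), a.2 = k := by
        intro a ha
        simpa using (List.mem_filter.mp ha).2
      have hq2 : q.2 = k := hallk q (by rw [hq]; simp)
      have hqsk : ∀ a ∈ qs, a.2 = k := fun a ha => hallk a (by rw [hq]; simp [ha])
      have hcanonfalse : ∀ a ∈ canon t ps, (a.2 == q.2) = false := by
        intro a ha
        rcases List.mem_flatMap.mp ha with ⟨k', hk', ha'⟩
        have : a.2 = k' := by simpa using (List.mem_filter.mp ha').2
        simp [this, hq2]
        exact ne_of_gt (hkt k' hk')
      have hstep : canon (k :: t) ps = q :: (qs ++ canon t ps) := by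
        unfold canon
        rw [List.flatMap_cons, hq]
        rfl
      rw [hstep, pyGroupby]
      have htw : (qs ++ canon t ps).takeWhile (fun a => a.2 == q.2) = qs := by
        rw [takeWhile_all_append _ _ _ (fun a ha => by simp [hqsk a ha, hq2]),
          takeWhile_false_all _ _ hcanonfalse, List.append_nil]
      have hdw : (qs ++ canon t ps).dropWhile (fun a => a.2 == q.2) = canon t ps := by
        rw [dropWhile_all_append _ _ _ (fun a ha => by simp [hqsk a ha, hq2]),
          dropWhile_false_all _ _ hcanonfalse]
      rw [htw, hdw, ih (fun k' hk' => hne k' (by simp [hk'])) hpt, List.map_cons, hq2, hq]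

-- the dict-grouping pass: value at key k is the filtered index list
lemma getD_grouping (ps : List (Int × String)) (d : PySem.Dict String (List Int)) (k : String) :
    (ps.foldl (fun d p => d.modify p.2 [] (fun xs => xs ++ [p.1])) d).getD k [] =
      d.getD k [] ++ (ps.filter (fun p => p.2 == k)).map (fun p => p.1) := by
  induction ps generalizing d with
  | nil => simp
  | cons p ps ih =>
      simp only [List.foldl_cons, List.filter_cons, ih]
      by_cases h : p.2 = k
      · simp [h]
      · simp [PySem.Dict.getD_modify, h, Ne.symm h]

-- ===== VERDICT (by name: the statement is the Claim_ definition above) =====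
theorem duplicate_keys_spec : Claim_equal_duplicate_keys := by
  intro l _
  show duplicate_keys l = duplicate_keys_alt l
  unfold duplicate_keys duplicate_keys_alt
  simp only []
  have hsnd : (PySem.List.enumerate l).map (fun p => p.2) = l := PySem.List.map_snd_enumerate l 0
  have hkeys : ((PySem.List.enumerate l).foldl
      (fun d p => d.modify p.2 [] (fun xs => xs ++ [p.1])) PySem.Dict.empty).keys
      = PySem.Set.ofList l := by
    rw [PySem.Dict.keys_foldl_modify_key (PySem.List.enumerate l) (fun p => p.2) []
      (fun _ p xs => xs ++ [p.1]) PySem.Dict.empty, hsnd]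
    simp [PySem.Set.update_nil_left]
  have hgetD : ∀ k, ((PySem.List.enumerate l).foldl
      (fun d p => d.modify p.2 [] (fun xs => xs ++ [p.1])) PySem.Dict.empty).getD k []
      = ((PySem.List.enumerate l).filter (fun p => p.2 == k)).map (fun p => p.1) := by
    intro k
    rw [getD_grouping]
    simp
  rw [hkeys]
  have hne : ∀ k ∈ PySem.List.sorted (PySem.Set.ofList l) (fun x => x) false,
      (PySem.List.enumerate l).filter (fun p => p.2 == k) ≠ [] := by
    intro k hk
    have : k ∈ l := (PySem.Set.mem_ofList l k).mp ((PySem.List.mem_sorted _ _ _ _).mp hk)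
    rw [← hsnd] at this
    rcases List.mem_map.mp this with ⟨q, hq, rfl⟩
    intro hnil
    exact absurd (by simp : (q.2 == q.2) = true)
      (by simpa using List.filter_eq_nil_iff.mp hnil q hq)
  have hA : PySem.List.sorted (PySem.List.enumerate l) (fun x => x.2) false =
      canon (PySem.List.sorted (PySem.Set.ofList l) (fun x => x) false)
        (PySem.List.enumerate l) := by
    have := stable_sorted (PySem.List.enumerate l)
    rw [hsnd] at this
    exact this
  rw [hA, pyGroupby_canon _ _ hne (PySem.List.sorted_ofList_pairwise_lt l), List.foldl_map]
  have hstep : (fun (ret : PySem.Set Int) (k : String) =>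
      if 1 < ((PySem.List.enumerate l).filter (fun p => p.2 == k)).length ∧
          0 < PySem.Str.len k then
        ((PySem.List.enumerate l).filter (fun p => p.2 == k)).foldl
          (fun r index => PySem.Set.add r index.1) ret
      else ret)
      = (fun (ret : PySem.Set Int) (k : String) =>
      if 1 < (((PySem.List.enumerate l).foldl
            (fun d p => d.modify p.2 [] (fun xs => xs ++ [p.1])) PySem.Dict.empty).getD k []).length ∧
          k ≠ "" then
        PySem.Set.update ret (((PySem.List.enumerate l).foldl
            (fun d p => d.modify p.2 [] (fun xs => xs ++ [p.1])) PySem.Dict.empty).getD k [])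
      else ret) := by
    funext ret k
    rw [hgetD k, ← PySem.Set.update_map_eq_foldl_add, List.length_map]
    apply if_congr _ rfl rfl
    have hlen : 0 < PySem.Str.len k ↔ k ≠ "" := by
      simp [PySem.Str.len]
      constructor
      · intro h hk
        rw [hk] at h
        simp at h
      · intro h
        rcases Nat.eq_zero_or_pos k.toList.length with h' | h'
        · exact absurd (by
            have : k.toList = [] := List.length_eq_zero_iff.mp h'
            exact String.toList_inj.mp (by simp [this]) : k = "") h
        · exact_mod_cast h'
    rw [hlen]
  exact congrArg (fun f => List.foldl f PySem.Set.empty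
    (PySem.List.sorted (PySem.Set.ofList l) (fun x => x) false)) hstep
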